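-- pv_equiv track=rewrite | github.com/kommade/aoc-2025 | 9/solution.py | build_outside_prefix
-- ===== SOURCE A (Python) =====
-- from collections import deque
--
-- def build_outside_prefix(points):
--     xs = sorted({p[0] for p in points} | {p[0] - 1 for p in points} | {p[0] + 1 for p in points})
--     ys = sorted({p[1] for p in points} | {p[1] - 1 for p in points} | {p[1] + 1 for p in points})
--
--     x_lookup = {value: idx for idx, value in enumerate(xs)}
--     y_lookup = {value: idx for idx, value in enumerate(ys)}
--
--     width = len(xs) - 1
--     height = len(ys) - 1
--
--     block_vertical = [[False] * (width + 1) for _ in range(height)]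
--     block_horizontal = [[False] * width for _ in range(height + 1)]
--
--     for idx in range(len(points)):
--         x1, y1 = points[idx]
--         x2, y2 = points[(idx + 1) % len(points)]
--         if x1 == x2:
--             x_line_idx = x_lookup[x1]
--             y_lo = min(y1, y2)
--             y_hi = max(y1, y2)
--             y_start = y_lookup[y_lo]
--             y_end = y_lookup[y_hi]
--             for y in range(y_start, y_end):
--                 block_vertical[y][x_line_idx] = True
--         else:
--             y_line_idx = y_lookup[y1]
--             x_lo = min(x1, x2)
--             x_hi = max(x1, x2)
--             x_start = x_lookup[x_lo]
--             x_end = x_lookup[x_hi]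
--             for x in range(x_start, x_end):
--                 block_horizontal[y_line_idx][x] = True
--
--     outside = [[False] * width for _ in range(height)]
--     q = deque()
--     start = (0, 0)
--     q.append(start)
--     outside[start[1]][start[0]] = True
--
--     while q:
--         cx, cy = q.popleft()
--
--         # move left
--         if cx > 0 and not block_vertical[cy][cx]:
--             nx, ny = cx - 1, cy
--             if not outside[ny][nx]:
--                 outside[ny][nx] = True
--                 q.append((nx, ny))
--
--         # move right
--         if cx < width - 1 and not block_vertical[cy][cx + 1]:
--             nx, ny = cx + 1, cy
--             if not outside[ny][nx]:
--                 outside[ny][nx] = True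
--                 q.append((nx, ny))
--
--         # move up
--         if cy > 0 and not block_horizontal[cy][cx]:
--             nx, ny = cx, cy - 1
--             if not outside[ny][nx]:
--                 outside[ny][nx] = True
--                 q.append((nx, ny))
--
--         # move down
--         if cy < height - 1 and not block_horizontal[cy + 1][cx]:
--             nx, ny = cx, cy + 1
--             if not outside[ny][nx]:
--                 outside[ny][nx] = True
--                 q.append((nx, ny))
--
--     outside_grid = [[1 if outside[row][col] else 0 for col in range(width)] for row in range(height)]
--     prefix = [[0] * (width + 1) for _ in range(height + 1)]
--     for y in range(height):
--         row_total = 0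
--         for x in range(width):
--             row_total += outside_grid[y][x]
--             prefix[y + 1][x + 1] = prefix[y][x + 1] + row_total
--
--     return prefix, x_lookup, y_lookup
-- ===== SOURCE B (Python) =====
-- def build_outside_prefix(points):
--     xs = sorted({p[0] for p in points} | {p[0] - 1 for p in points} | {p[0] + 1 for p in points})
--     ys = sorted({p[1] for p in points} | {p[1] - 1 for p in points} | {p[1] + 1 for p in points})
--
--     x_lookup = {value: idx for idx, value in enumerate(xs)}
--     y_lookup = {value: idx for idx, value in enumerate(ys)}
--
--     width = len(xs) - 1
--     height = len(ys) - 1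
--
--     block_vertical = [[False] * (width + 1) for _ in range(height)]
--     block_horizontal = [[False] * width for _ in range(height + 1)]
--
--     for idx in range(len(points)):
--         x1, y1 = points[idx]
--         x2, y2 = points[(idx + 1) % len(points)]
--         if x1 == x2:
--             x_line_idx = x_lookup[x1]
--             y_start = y_lookup[min(y1, y2)]
--             y_end = y_lookup[max(y1, y2)]
--             for y in range(y_start, y_end):
--                 block_vertical[y][x_line_idx] = True
--         else:
--             y_line_idx = y_lookup[y1]
--             x_start = x_lookup[min(x1, x2)]
--             x_end = x_lookup[max(x1, x2)]
--             for x in range(x_start, x_end):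
--                 block_horizontal[y_line_idx][x] = True
--
--     # flood fill by Gauss-Seidel relaxation sweeps instead of a BFS queue:
--     # grow the outside set by full raster passes until a pass adds nothing.
--     outside = {(0, 0)}
--     changed = True
--     while changed:
--         changed = False
--         for cy in range(height):
--             for cx in range(width):
--                 if (cx, cy) not in outside:
--                     if (cx > 0 and not block_vertical[cy][cx] and (cx - 1, cy) in outside) or \
--                        (cx < width - 1 and not block_vertical[cy][cx + 1] and (cx + 1, cy) in outside) or \
--                        (cy > 0 and not block_horizontal[cy][cx] and (cx, cy - 1) in outside) or \
--                        (cy < height - 1 and not block_horizontal[cy + 1][cx] and (cx, cy + 1) in outside):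
--                         outside.add((cx, cy))
--                         changed = True
--
--     outside_grid = [[1 if (cx, cy) in outside else 0 for cx in range(width)] for cy in range(height)]
--     prefix = [[0] * (width + 1) for _ in range(height + 1)]
--     for y in range(height):
--         row_total = 0
--         for x in range(width):
--             row_total += outside_grid[y][x]
--             prefix[y + 1][x + 1] = prefix[y][x + 1] + row_total
--
--     return prefix, x_lookup, y_lookup
-- ===== Notes on version B (the rewrite author's own statement) =====
-- stated objective: alternative
-- what changed: The BFS flood fill (deque, popleft/append, push marking of the four neighbours) is replaced by iterated Gauss-Seidel relaxation: full raster sweeps over all compressed cells that pull a cell into the outside set when an unblocked neighbour is already in it, repeated until a sweep adds nothing; coordinate compression, edge marking and the prefix sum are unchanged.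
import Mathlib
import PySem

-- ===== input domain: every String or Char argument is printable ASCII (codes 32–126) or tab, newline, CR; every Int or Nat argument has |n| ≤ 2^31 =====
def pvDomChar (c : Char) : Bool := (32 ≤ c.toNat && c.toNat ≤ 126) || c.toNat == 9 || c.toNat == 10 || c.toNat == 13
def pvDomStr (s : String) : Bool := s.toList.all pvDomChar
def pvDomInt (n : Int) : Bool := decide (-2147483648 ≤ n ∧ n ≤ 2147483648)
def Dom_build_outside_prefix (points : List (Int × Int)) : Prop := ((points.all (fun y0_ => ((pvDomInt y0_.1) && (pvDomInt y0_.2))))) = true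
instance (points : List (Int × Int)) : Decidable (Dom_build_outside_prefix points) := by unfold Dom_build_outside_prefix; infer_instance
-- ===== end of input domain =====

-- B replaces A's BFS-queue flood fill by Gauss-Seidel relaxation sweeps (repeated
-- full raster passes growing the outside set until a pass adds nothing); the
-- coordinate compression, edge marking and prefix-sum passages are identical in
-- both Pythons and share one transliteration.

-- xs = sorted({p0 for p} | {p0-1 for p} | {p0+1 for p})
def pvAxis (vals : List Int) : List Int :=
  PySem.List.sorted
    (PySem.Set.union (PySem.Set.union (PySem.Set.ofList vals) (PySem.Set.ofList (vals.map (· - 1))))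
      (PySem.Set.ofList (vals.map (· + 1)))) (fun v => v) false

-- {value: idx for idx, value in enumerate(xs)}
def pvLookup (xs : List Int) : PySem.Dict Int Int :=
  (PySem.List.enumerate xs).foldl (fun d p => d.insert p.2 p.1) PySem.Dict.empty

-- grid[y][x] and grid[y][x] = True (in-range whenever the Python runs)
def pvGet2 (g : List (List Bool)) (y x : Nat) : Bool := (g.getD y []).getD x false
def pvSet2 (g : List (List Bool)) (y x : Nat) : List (List Bool) := g.set y ((g.getD y []).set x true)

-- the edge-marking loop over consecutive point pairs (shared by A and B)
def pvMark (points : List (Int × Int)) (xl yl : PySem.Dict Int Int) (w h : Nat) :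
    List (List Bool) × List (List Bool) :=
  (List.range points.length).foldl (fun st idx =>
    let p1 := points.getD idx (0, 0)
    let p2 := points.getD ((idx + 1) % points.length) (0, 0)
    if p1.1 == p2.1 then
      let xi := (PySem.Dict.getD xl p1.1 0).toNat
      let ys := PySem.Dict.getD yl (min p1.2 p2.2) 0
      let ye := PySem.Dict.getD yl (max p1.2 p2.2) 0
      ((PySem.List.pyRange ys ye 1).foldl (fun bv y => pvSet2 bv y.toNat xi) st.1, st.2)
    else
      let yi := (PySem.Dict.getD yl p1.2 0).toNat
      let xs := PySem.Dict.getD xl (min p1.1 p2.1) 0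
      let xe := PySem.Dict.getD xl (max p1.1 p2.1) 0
      (st.1, (PySem.List.pyRange xs xe 1).foldl (fun bh x => pvSet2 bh yi x.toNat) st.2))
    (List.replicate h (List.replicate (w + 1) false), List.replicate (h + 1) (List.replicate w false))

-- prefix-sum loop (shared by A and B)
def pvPrefix (grid : List (List Int)) (w h : Nat) : List (List Int) :=
  (List.range h).foldl (fun pre y =>
    ((List.range w).foldl (fun (st : List (List Int) × Int) x =>
        let rt := st.2 + ((grid.getD y []).getD x 0)
        (st.1.set (y + 1) ((st.1.getD (y + 1) []).set (x + 1) ((st.1.getD y []).getD (x + 1) 0 + rt)), rt))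
      (pre, 0)).1)
    (List.replicate (h + 1) (List.replicate (w + 1) (0 : Int)))

-- ===== PORT A =====
-- 'if not outside[ny][nx]: outside[ny][nx] = True; q.append((nx, ny))'
def pvVisit (s : List (List Bool) × List (Nat × Nat)) (n : Nat × Nat) :
    List (List Bool) × List (Nat × Nat) :=
  if pvGet2 s.1 n.2 n.1 then s else (pvSet2 s.1 n.2 n.1, s.2 ++ [n])

-- the BFS while-loop (deque popleft / append); the fuel argument only makes the
-- recursion structural — it is chosen large enough to never run out (proved below)
def pvBFS (w h : Nat) (bv bh : List (List Bool)) :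
    Nat → List (List Bool) → List (Nat × Nat) → List (List Bool)
  | 0, g, _ => g
  | _ + 1, g, [] => g
  | fuel + 1, g, c :: rest =>
    let s0 := (g, rest)
    let s1 := if 0 < c.1 && !pvGet2 bv c.2 c.1 then pvVisit s0 (c.1 - 1, c.2) else s0
    let s2 := if c.1 < w - 1 && !pvGet2 bv c.2 (c.1 + 1) then pvVisit s1 (c.1 + 1, c.2) else s1
    let s3 := if 0 < c.2 && !pvGet2 bh c.2 c.1 then pvVisit s2 (c.1, c.2 - 1) else s2
    let s4 := if c.2 < h - 1 && !pvGet2 bh (c.2 + 1) c.1 then pvVisit s3 (c.1, c.2 + 1) else s3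
    pvBFS w h bv bh fuel s4.1 s4.2

def build_outside_prefix (points : List (Int × Int)) :
    List (List Int) × (List (Int × Int)) × (List (Int × Int)) :=
  let xs := pvAxis (points.map (·.1))
  let ys := pvAxis (points.map (·.2))
  let xl := pvLookup xs
  let yl := pvLookup ys
  let w := xs.length - 1
  let h := ys.length - 1
  let bvh := pvMark points xl yl w h
  let g0 := pvSet2 (List.replicate h (List.replicate w false)) 0 0
  let gf := pvBFS w h bvh.1 bvh.2 (2 * (w * h) + 1) g0 [(0, 0)]
  let grid := (List.range h).map (fun y => (List.range w).map (fun x => if pvGet2 gf y x then (1 : Int) else 0))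
  (pvPrefix grid w h, xl.items, yl.items)

-- ===== PORT B =====
-- the pull-condition of one cell: some unblocked neighbour is already outside
def pvCond (w h : Nat) (bv bh : List (List Bool)) (s : PySem.Set (Nat × Nat)) (cx cy : Nat) : Bool :=
  (0 < cx && !pvGet2 bv cy cx && PySem.Set.contains s (cx - 1, cy)) ||
  (cx < w - 1 && !pvGet2 bv cy (cx + 1) && PySem.Set.contains s (cx + 1, cy)) ||
  (0 < cy && !pvGet2 bh cy cx && PySem.Set.contains s (cx, cy - 1)) ||
  (cy < h - 1 && !pvGet2 bh (cy + 1) cx && PySem.Set.contains s (cx, cy + 1))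

-- one full raster sweep of the relaxation, with the 'changed' flag
def pvPass (w h : Nat) (bv bh : List (List Bool)) (s : PySem.Set (Nat × Nat)) :
    PySem.Set (Nat × Nat) × Bool :=
  (List.range h).foldl (fun st cy =>
    (List.range w).foldl (fun st cx =>
        if !PySem.Set.contains st.1 (cx, cy) && pvCond w h bv bh st.1 cx cy
        then (PySem.Set.add st.1 (cx, cy), true) else st) st)
    (s, false)

-- 'while changed' — fuel again only a totality guard, proved sufficient below
def pvRelax (w h : Nat) (bv bh : List (List Bool)) :
    Nat → PySem.Set (Nat × Nat) → PySem.Set (Nat × Nat)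
  | 0, s => s
  | fuel + 1, s =>
    let p := pvPass w h bv bh s
    if p.2 then pvRelax w h bv bh fuel p.1 else p.1

def build_outside_prefix_alt (points : List (Int × Int)) :
    List (List Int) × (List (Int × Int)) × (List (Int × Int)) :=
  let xs := pvAxis (points.map (·.1))
  let ys := pvAxis (points.map (·.2))
  let xl := pvLookup xs
  let yl := pvLookup ys
  let w := xs.length - 1
  let h := ys.length - 1
  let bvh := pvMark points xl yl w h
  let out := pvRelax w h bvh.1 bvh.2 (w * h + 1) (PySem.Set.ofList [(0, 0)])
  let grid := (List.range h).map (fun cy => (List.range w).map (fun cx => if PySem.Set.contains out (cx, cy) then (1 : Int) else 0))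
  (pvPrefix grid w h, xl.items, yl.items)

-- ===== PRECONDITION & SPEC =====
-- Python A raises IndexError on the empty list (it seeds outside[0][0]); excluded.
def Pre_build_outside_prefix (points : List (Int × Int)) : Prop := points ≠ []
instance (points : List (Int × Int)) : Decidable (Pre_build_outside_prefix points) := by unfold Pre_build_outside_prefix; infer_instance
def pvWitness_build_outside_prefix : (List (Int × Int)) := [(0, 0), (0, 2), (2, 2), (2, 0)]

def Spec_build_outside_prefix (points : List (Int × Int)) (out : List (List Int) × (List (Int × Int)) × (List (Int × Int))) : Prop := out = build_outside_prefix_alt points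
instance (points : List (Int × Int)) (out : List (List Int) × (List (Int × Int)) × (List (Int × Int))) : Decidable (Spec_build_outside_prefix points out) := by unfold Spec_build_outside_prefix; infer_instance

-- ===== CLAIM (what is proved, stated in full; the proofs are below) =====
def Claim_equal_build_outside_prefix : Prop := ∀ (points : List (Int × Int)), Dom_build_outside_prefix points → Pre_build_outside_prefix points → Spec_build_outside_prefix points (build_outside_prefix points)

-- ===== LEMMAS AND PROOFS =====

-- ===== proof-side definitions =====
def pvMv (w h : Nat) (bv bh : List (List Bool)) (c d : Nat × Nat) : Prop :=
  c.1 < w ∧ c.2 < h ∧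
  ((0 < c.1 ∧ pvGet2 bv c.2 c.1 = false ∧ d = (c.1 - 1, c.2)) ∨
   (c.1 < w - 1 ∧ pvGet2 bv c.2 (c.1 + 1) = false ∧ d = (c.1 + 1, c.2)) ∨
   (0 < c.2 ∧ pvGet2 bh c.2 c.1 = false ∧ d = (c.1, c.2 - 1)) ∨
   (c.2 < h - 1 ∧ pvGet2 bh (c.2 + 1) c.1 = false ∧ d = (c.1, c.2 + 1)))

theorem pvMv_inb₂ {w h : Nat} {bv bh : List (List Bool)} {c d : Nat × Nat}
    (hm : pvMv w h bv bh c d) : d.1 < w ∧ d.2 < h := by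
  obtain ⟨h1, h2, h3⟩ := hm
  rcases h3 with ⟨ha, hb, rfl⟩ | ⟨ha, hb, rfl⟩ | ⟨ha, hb, rfl⟩ | ⟨ha, hb, rfl⟩ <;> constructor <;> simp <;> omega

theorem pvMv_symm {w h : Nat} {bv bh : List (List Bool)} {c d : Nat × Nat}
    (hm : pvMv w h bv bh c d) : pvMv w h bv bh d c := by
  obtain ⟨cx, cy⟩ := c
  obtain ⟨h1, h2, h3⟩ := hm
  rcases h3 with ⟨ha, hb, rfl⟩ | ⟨ha, hb, rfl⟩ | ⟨ha, hb, rfl⟩ | ⟨ha, hb, rfl⟩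
  · refine ⟨by simp; omega, by simpa using h2, Or.inr (Or.inl ⟨by simp; omega, ?_, ?_⟩)⟩
    · simpa [Nat.sub_add_cancel ha] using hb
    · simp [Prod.ext_iff]; omega
  · refine ⟨by simp; omega, by simpa using h2, Or.inl ⟨by simp, by simpa using hb, ?_⟩⟩
    simp [Prod.ext_iff]
  · refine ⟨by simpa using h1, by simp; omega, Or.inr (Or.inr (Or.inr ⟨by simp; omega, ?_, ?_⟩))⟩
    · simpa [Nat.sub_add_cancel ha] using hb
    · simp [Prod.ext_iff]; omega
  · refine ⟨by simpa using h1, by simp; omega, Or.inr (Or.inr (Or.inl ⟨by simp, by simpa using hb, ?_⟩))⟩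
    simp [Prod.ext_iff]

def pvWf (w h : Nat) (g : List (List Bool)) : Prop :=
  g.length = h ∧ ∀ r ∈ g, r.length = w

theorem pvWf_set2 {w h : Nat} {g : List (List Bool)} (hwf : pvWf w h g) (y x : Nat) :
    pvWf w h (pvSet2 g y x) := by
  by_cases hy : y < g.length
  · constructor
    · simp [pvSet2, hwf.1]
    · intro r hr
      rcases List.mem_or_eq_of_mem_set hr with hr' | rfl
      · exact hwf.2 _ hr'
      · rw [List.length_set]
        exact hwf.2 _ (by rw [List.getD_eq_getElem _ _ hy]; exact List.getElem_mem hy)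
  · have : pvSet2 g y x = g := List.set_eq_of_length_le (by omega)
    rw [this]; exact hwf

theorem pvGet2_set2 {w h : Nat} {g : List (List Bool)} (hwf : pvWf w h g) {y x : Nat}
    (hy : y < h) (hx : x < w) (y' x' : Nat) :
    pvGet2 (pvSet2 g y x) y' x' = if y' = y ∧ x' = x then true else pvGet2 g y' x' := by
  have hyl : y < g.length := by rw [hwf.1]; exact hy
  have hrow : (g.getD y []).length = w := hwf.2 _ (by rw [List.getD_eq_getElem _ _ hyl]; exact List.getElem_mem hyl)
  unfold pvGet2 pvSet2
  by_cases hy' : y' = y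
  · rw [hy']
    have h1 : (g.set y ((g.getD y []).set x true)).getD y [] = (g.getD y []).set x true := by
      rw [List.getD_eq_getElem _ _ (by simpa using hyl)]
      exact List.getElem_set_self _
    rw [h1]
    by_cases hx' : x' = x
    · rw [hx']
      simp only [and_self, if_pos rfl]
      rw [List.getD_eq_getElem _ _ (by rw [List.length_set]; omega)]
      exact List.getElem_set_self _
    · simp only [hx', and_false, if_false]
      rw [List.getD_eq_getElem?_getD, List.getD_eq_getElem?_getD,
        List.getElem?_set_ne (fun hc => hx' hc.symm)]
      simp [List.getD_eq_getElem?_getD]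
  · simp only [hy', false_and, if_false]
    have h2 : (g.set y ((g.getD y []).set x true)).getD y' [] = g.getD y' [] := by
      rw [List.getD_eq_getElem?_getD, List.getD_eq_getElem?_getD,
        List.getElem?_set_ne (fun hc => hy' hc.symm)]
      simp [List.getD_eq_getElem?_getD]
    rw [h2]
def pvMF (w h : Nat) (g : List (List Bool)) : Finset (Nat × Nat) :=
  (Finset.range w ×ˢ Finset.range h).filter (fun c => pvGet2 g c.2 c.1 = true)

theorem pvMF_card_le (w h : Nat) (g : List (List Bool)) : (pvMF w h g).card ≤ w * h := by
  calc (pvMF w h g).card ≤ (Finset.range w ×ˢ Finset.range h).card := Finset.card_filter_le _ _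
    _ = w * h := by simp [Finset.card_product]

theorem pvMem_MF {w h : Nat} {g : List (List Bool)} {c : Nat × Nat} :
    c ∈ pvMF w h g ↔ c.1 < w ∧ c.2 < h ∧ pvGet2 g c.2 c.1 = true := by
  simp [pvMF, Finset.mem_filter, Finset.mem_product, and_assoc]

theorem pvMF_set2 {w h : Nat} {g : List (List Bool)} (hwf : pvWf w h g) {y x : Nat}
    (hy : y < h) (hx : x < w) :
    pvMF w h (pvSet2 g y x) = insert (x, y) (pvMF w h g) := by
  ext ⟨a, b⟩
  simp only [pvMem_MF, Finset.mem_insert, pvGet2_set2 hwf hy hx, Prod.mk.injEq]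
  by_cases hab : b = y ∧ a = x
  · obtain ⟨rfl, rfl⟩ := hab
    simp [hx, hy]
  · rw [if_neg hab]
    constructor
    · intro hc; exact Or.inr hc
    · rintro (⟨rfl, rfl⟩ | hc)
      · exact absurd ⟨rfl, rfl⟩ hab
      · exact hc

def pvMeas (w h : Nat) (g : List (List Bool)) (q : List (Nat × Nat)) : Nat :=
  2 * (w * h - (pvMF w h g).card) + q.length

theorem pvCVisit (w h : Nat) (s : List (List Bool) × List (Nat × Nat)) (n : Nat × Nat) (b : Bool)
    (hn : b = true → n.1 < w ∧ n.2 < h) (hwf : pvWf w h s.1) :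
    pvWf w h (if b then pvVisit s n else s).1 ∧
    (∀ a : Nat × Nat, pvGet2 s.1 a.2 a.1 = true → pvGet2 (if b then pvVisit s n else s).1 a.2 a.1 = true) ∧
    (∀ a : Nat × Nat, pvGet2 (if b then pvVisit s n else s).1 a.2 a.1 = true →
      pvGet2 s.1 a.2 a.1 = true ∨ (b = true ∧ a = n)) ∧
    (b = true → pvGet2 (if b then pvVisit s n else s).1 n.2 n.1 = true) ∧
    (∀ a : Nat × Nat, a ∈ (if b then pvVisit s n else s).2 →
      a ∈ s.2 ∨ pvGet2 (if b then pvVisit s n else s).1 a.2 a.1 = true) ∧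
    (∀ a : Nat × Nat, a ∈ s.2 → a ∈ (if b then pvVisit s n else s).2) ∧
    (∀ a : Nat × Nat, pvGet2 (if b then pvVisit s n else s).1 a.2 a.1 = true →
      pvGet2 s.1 a.2 a.1 = true ∨ a ∈ (if b then pvVisit s n else s).2) ∧
    pvMeas w h (if b then pvVisit s n else s).1 (if b then pvVisit s n else s).2 ≤ pvMeas w h s.1 s.2 := by
  cases b
  · simp only [Bool.false_eq_true, if_false]
    exact ⟨hwf, fun a ha => ha, fun a ha => Or.inl ha, by simp, fun a ha => Or.inl ha,
      fun a ha => ha, fun a ha => Or.inl ha, le_refl _⟩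
  · simp only [eq_self_iff_true, if_true]
    obtain ⟨hn1, hn2⟩ := hn rfl
    by_cases hm : pvGet2 s.1 n.2 n.1 = true
    · rw [pvVisit, if_pos hm]
      exact ⟨hwf, fun a ha => ha, fun a ha => Or.inl ha, fun _ => hm, fun a ha => Or.inl ha,
        fun a ha => ha, fun a ha => Or.inl ha, le_refl _⟩
    · rw [pvVisit, if_neg hm]
      have hmf : pvGet2 s.1 n.2 n.1 = false := by simpa using hm
      have hset := pvGet2_set2 (y := n.2) (x := n.1) hwf hn2 hn1
      have hmfi : pvMF w h (pvSet2 s.1 n.2 n.1) = insert (n.1, n.2) (pvMF w h s.1) :=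
        pvMF_set2 hwf hn2 hn1
      have hnot : (n.1, n.2) ∉ pvMF w h s.1 := by simp [pvMem_MF, hmf]
      have hcard : (pvMF w h (pvSet2 s.1 n.2 n.1)).card = (pvMF w h s.1).card + 1 := by
        rw [hmfi, Finset.card_insert_of_notMem hnot]
      have hle : (pvMF w h s.1).card + 1 ≤ w * h := by
        rw [← hcard]; exact pvMF_card_le _ _ _
      refine ⟨pvWf_set2 hwf _ _, ?_, ?_, ?_, ?_, ?_, ?_, ?_⟩
      · intro a ha
        rw [hset]; split_ifs with hc
        · rfl
        · exact ha
      · intro a ha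
        rw [hset] at ha; split_ifs at ha with hc
        · right; exact ⟨trivial, Prod.ext hc.2 hc.1⟩
        · left; exact ha
      · intro _; rw [hset]; simp
      · intro a ha
        simp only [List.mem_append, List.mem_singleton] at ha
        rcases ha with ha | rfl
        · left; exact ha
        · right; rw [hset]; simp
      · intro a ha; simp [ha]
      · intro a ha
        rw [hset] at ha; split_ifs at ha with hc
        · right
          simp only [List.mem_append, List.mem_singleton]
          right; exact Prod.ext hc.2 hc.1
        · left; exact ha
      · simp only [pvMeas, hcard, List.length_append, List.length_singleton]
        omega

theorem pvBFS_master (w h : Nat) (bv bh : List (List Bool)) :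
    ∀ (fuel : Nat) (g : List (List Bool)) (q : List (Nat × Nat)),
    pvWf w h g →
    (∀ a : Nat × Nat, pvGet2 g a.2 a.1 = true → a.1 < w ∧ a.2 < h) →
    (∀ a ∈ q, pvGet2 g a.2 a.1 = true) →
    (∀ a d : Nat × Nat, pvGet2 g a.2 a.1 = true → pvMv w h bv bh a d →
        pvGet2 g d.2 d.1 = true ∨ a ∈ q) →
    pvMeas w h g q < fuel →
    (∀ a : Nat × Nat, pvGet2 g a.2 a.1 = true →
        pvGet2 (pvBFS w h bv bh fuel g q) a.2 a.1 = true) ∧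
    (∀ a d : Nat × Nat, pvGet2 (pvBFS w h bv bh fuel g q) a.2 a.1 = true →
        pvMv w h bv bh a d → pvGet2 (pvBFS w h bv bh fuel g q) d.2 d.1 = true) ∧
    (∀ T : Nat × Nat → Prop, (∀ a d : Nat × Nat, pvMv w h bv bh a d → T a → T d) →
        (∀ a : Nat × Nat, pvGet2 g a.2 a.1 = true → T a) →
        ∀ a : Nat × Nat, pvGet2 (pvBFS w h bv bh fuel g q) a.2 a.1 = true → T a) := by
  intro fuel
  induction fuel with
  | zero => intro g q _ _ _ _ hme; exact absurd hme (Nat.not_lt_zero _)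
  | succ fuel IH =>
    intro g q hwf hinb hq hJ hme
    cases q with
    | nil =>
      have hred : pvBFS w h bv bh (fuel + 1) g [] = g := by simp [pvBFS]
      rw [hred]
      refine ⟨fun a ha => ha, ?_, ?_⟩
      · intro a d ha hmv
        rcases hJ a d ha hmv with hd | hin
        · exact hd
        · cases hin
      · intro T _ hT a ha; exact hT a ha
    | cons c rest =>
      have hc : pvGet2 g c.2 c.1 = true := hq c List.mem_cons_self
      obtain ⟨hcw, hch⟩ := hinb c hc
      set b1 : Bool := 0 < c.1 && !pvGet2 bv c.2 c.1 with hb1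
      set s1 := if b1 then pvVisit (g, rest) (c.1 - 1, c.2) else (g, rest) with hs1
      set b2 : Bool := c.1 < w - 1 && !pvGet2 bv c.2 (c.1 + 1) with hb2
      set s2 := if b2 then pvVisit s1 (c.1 + 1, c.2) else s1 with hs2
      set b3 : Bool := 0 < c.2 && !pvGet2 bh c.2 c.1 with hb3
      set s3 := if b3 then pvVisit s2 (c.1, c.2 - 1) else s2 with hs3
      set b4 : Bool := c.2 < h - 1 && !pvGet2 bh (c.2 + 1) c.1 with hb4
      set s4 := if b4 then pvVisit s3 (c.1, c.2 + 1) else s3 with hs4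
      -- guard facts
      have gb1 : b1 = true → pvGet2 bv c.2 c.1 = false ∧ 0 < c.1 := by
        rw [hb1]; simp only [Bool.and_eq_true, decide_eq_true_eq, Bool.not_eq_true']
        exact fun hb => ⟨hb.2, hb.1⟩
      have gb2 : b2 = true → pvGet2 bv c.2 (c.1 + 1) = false ∧ c.1 < w - 1 := by
        rw [hb2]; simp only [Bool.and_eq_true, decide_eq_true_eq, Bool.not_eq_true']
        exact fun hb => ⟨hb.2, hb.1⟩
      have gb3 : b3 = true → pvGet2 bh c.2 c.1 = false ∧ 0 < c.2 := by
        rw [hb3]; simp only [Bool.and_eq_true, decide_eq_true_eq, Bool.not_eq_true']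
        exact fun hb => ⟨hb.2, hb.1⟩
      have gb4 : b4 = true → pvGet2 bh (c.2 + 1) c.1 = false ∧ c.2 < h - 1 := by
        rw [hb4]; simp only [Bool.and_eq_true, decide_eq_true_eq, Bool.not_eq_true']
        exact fun hb => ⟨hb.2, hb.1⟩
      have hmv1 : b1 = true → pvMv w h bv bh c (c.1 - 1, c.2) := fun hb =>
        ⟨hcw, hch, Or.inl ⟨(gb1 hb).2, (gb1 hb).1, rfl⟩⟩
      have hmv2 : b2 = true → pvMv w h bv bh c (c.1 + 1, c.2) := fun hb =>
        ⟨hcw, hch, Or.inr (Or.inl ⟨(gb2 hb).2, (gb2 hb).1, rfl⟩)⟩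
      have hmv3 : b3 = true → pvMv w h bv bh c (c.1, c.2 - 1) := fun hb =>
        ⟨hcw, hch, Or.inr (Or.inr (Or.inl ⟨(gb3 hb).2, (gb3 hb).1, rfl⟩))⟩
      have hmv4 : b4 = true → pvMv w h bv bh c (c.1, c.2 + 1) := fun hb =>
        ⟨hcw, hch, Or.inr (Or.inr (Or.inr ⟨(gb4 hb).2, (gb4 hb).1, rfl⟩))⟩
      obtain ⟨W1, M1, N1, K1, Q1, QM1, R1, ME1⟩ :=
        pvCVisit w h (g, rest) (c.1 - 1, c.2) b1
          (fun hb => ⟨by have := (gb1 hb).2; omega, by simpa using hch⟩) hwf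
      rw [← hs1] at W1 M1 N1 K1 Q1 QM1 R1 ME1
      obtain ⟨W2, M2, N2, K2, Q2, QM2, R2, ME2⟩ :=
        pvCVisit w h s1 (c.1 + 1, c.2) b2
          (fun hb => ⟨by have := (gb2 hb).2; omega, by simpa using hch⟩) W1
      rw [← hs2] at W2 M2 N2 K2 Q2 QM2 R2 ME2
      obtain ⟨W3, M3, N3, K3, Q3, QM3, R3, ME3⟩ :=
        pvCVisit w h s2 (c.1, c.2 - 1) b3
          (fun hb => ⟨by simpa using hcw, by have := (gb3 hb).2; omega⟩) W2
      rw [← hs3] at W3 M3 N3 K3 Q3 QM3 R3 ME3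
      obtain ⟨W4, M4, N4, K4, Q4, QM4, R4, ME4⟩ :=
        pvCVisit w h s3 (c.1, c.2 + 1) b4
          (fun hb => ⟨by simpa using hcw, by have := (gb4 hb).2; omega⟩) W3
      rw [← hs4] at W4 M4 N4 K4 Q4 QM4 R4 ME4
      -- chains
      have M14 : ∀ a : Nat × Nat, pvGet2 s1.1 a.2 a.1 = true → pvGet2 s4.1 a.2 a.1 = true :=
        fun a ha => M4 a (M3 a (M2 a ha))
      have M04 : ∀ a : Nat × Nat, pvGet2 g a.2 a.1 = true → pvGet2 s4.1 a.2 a.1 = true :=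
        fun a ha => M14 a (M1 a ha)
      have QM14 : ∀ a : Nat × Nat, a ∈ s1.2 → a ∈ s4.2 :=
        fun a ha => QM4 a (QM3 a (QM2 a ha))
      have QM04 : ∀ a : Nat × Nat, a ∈ rest → a ∈ s4.2 :=
        fun a ha => QM14 a (QM1 a ha)
      -- all neighbours of c are marked in s4
      have hnb : ∀ d : Nat × Nat, pvMv w h bv bh c d → pvGet2 s4.1 d.2 d.1 = true := by
        intro d hmv
        obtain ⟨-, -, hcase⟩ := hmv
        rcases hcase with ⟨ha, hbf, rfl⟩ | ⟨ha, hbf, rfl⟩ | ⟨ha, hbf, rfl⟩ | ⟨ha, hbf, rfl⟩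
        · exact M14 _ (K1 (by rw [hb1]; simp [ha, hbf]))
        · exact M4 _ (M3 _ (K2 (by rw [hb2]; simp [ha, hbf])))
        · exact M4 _ (K3 (by rw [hb3]; simp [ha, hbf]))
        · exact K4 (by rw [hb4]; simp [ha, hbf])
      -- marked in s4 comes from g or is one of the four targets (with its guard)
      have hsrc : ∀ a : Nat × Nat, pvGet2 s4.1 a.2 a.1 = true →
          pvGet2 g a.2 a.1 = true ∨ pvMv w h bv bh c a := by
        intro a ha
        rcases N4 a ha with ha3 | ⟨hb, rfl⟩
        · rcases N3 a ha3 with ha2 | ⟨hb, rfl⟩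
          · rcases N2 a ha2 with ha1 | ⟨hb, rfl⟩
            · rcases N1 a ha1 with ha0 | ⟨hb, rfl⟩
              · exact Or.inl ha0
              · exact Or.inr (hmv1 hb)
            · exact Or.inr (hmv2 hb)
          · exact Or.inr (hmv3 hb)
        · exact Or.inr (hmv4 hb)
      -- marked in s4 is marked in g or in the new queue
      have hval : ∀ a : Nat × Nat, pvGet2 s4.1 a.2 a.1 = true →
          pvGet2 g a.2 a.1 = true ∨ a ∈ s4.2 := by
        intro a ha
        rcases R4 a ha with ha3 | hq4
        · rcases R3 a ha3 with ha2 | hq3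
          · rcases R2 a ha2 with ha1 | hq2
            · rcases R1 a ha1 with ha0 | hq1
              · exact Or.inl ha0
              · exact Or.inr (QM14 a hq1)
            · exact Or.inr (QM4 a (QM3 a hq2))
          · exact Or.inr (QM4 a hq3)
        · exact Or.inr hq4
      -- invariants for the recursive call
      have hinb4 : ∀ a : Nat × Nat, pvGet2 s4.1 a.2 a.1 = true → a.1 < w ∧ a.2 < h := by
        intro a ha
        rcases hsrc a ha with h0 | hmv
        · exact hinb a h0
        · exact pvMv_inb₂ hmv
      have hq4 : ∀ a ∈ s4.2, pvGet2 s4.1 a.2 a.1 = true := by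
        intro a ha
        rcases Q4 a ha with ha3 | hm4
        · rcases Q3 a ha3 with ha2 | hm3
          · rcases Q2 a ha2 with ha1 | hm2
            · rcases Q1 a ha1 with ha0 | hm1
              · exact M04 a (hq a (List.mem_cons_of_mem _ ha0))
              · exact M14 a hm1
            · exact M4 a (M3 a hm2)
          · exact M4 a hm3
        · exact hm4
      have hJ4 : ∀ a d : Nat × Nat, pvGet2 s4.1 a.2 a.1 = true → pvMv w h bv bh a d →
          pvGet2 s4.1 d.2 d.1 = true ∨ a ∈ s4.2 := by
        intro a d ha hmv
        rcases hval a ha with h0 | hqm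
        · rcases hJ a d h0 hmv with hd | hin
          · exact Or.inl (M04 d hd)
          · rcases List.mem_cons.mp hin with rfl | hr
            · exact Or.inl (hnb d hmv)
            · exact Or.inr (QM04 a hr)
        · exact Or.inr hqm
      have hme4 : pvMeas w h s4.1 s4.2 < fuel := by
        have hchain : pvMeas w h s4.1 s4.2 ≤ pvMeas w h g rest :=
          le_trans ME4 (le_trans ME3 (le_trans ME2 ME1))
        have hcons : pvMeas w h g (c :: rest) = pvMeas w h g rest + 1 := by
          simp [pvMeas, List.length_cons]; omega
        omega
      obtain ⟨I1, I2, I3⟩ := IH s4.1 s4.2 W4 hinb4 hq4 hJ4 hme4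
      have hstep : pvBFS w h bv bh (fuel + 1) g (c :: rest) = pvBFS w h bv bh fuel s4.1 s4.2 := rfl
      rw [hstep]
      refine ⟨fun a ha => I1 a (M04 a ha), I2, ?_⟩
      · intro T hclosed hTg a ha
        refine I3 T hclosed ?_ a ha
        intro a' ha'
        rcases hsrc a' ha' with h0 | hmv
        · exact hTg a' h0
        · exact hclosed c a' hmv (hTg c hc)

def pvL (w h : Nat) : List (Nat × Nat) :=
  (List.range h).flatMap (fun cy => (List.range w).map (fun cx => (cx, cy)))

theorem pvMem_L {w h : Nat} {c : Nat × Nat} : c ∈ pvL w h ↔ c.1 < w ∧ c.2 < h := by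
  obtain ⟨a, b⟩ := c
  simp [pvL, List.mem_flatMap, List.mem_map, List.mem_range, eq_comm, and_comm]

def pvStep (w h : Nat) (bv bh : List (List Bool)) (st : PySem.Set (Nat × Nat) × Bool)
    (c : Nat × Nat) : PySem.Set (Nat × Nat) × Bool :=
  if !PySem.Set.contains st.1 c && pvCond w h bv bh st.1 c.1 c.2
  then (PySem.Set.add st.1 c, true) else st

theorem pvFoldl_flatMap {α β γ : Type} (l : List α) (f : α → List β) (φ : γ → β → γ) (init : γ) :
    (l.flatMap f).foldl φ init = l.foldl (fun st a => (f a).foldl φ st) init := by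
  induction l generalizing init with
  | nil => rfl
  | cons x xs ih => simp [List.foldl_append, ih]

theorem pvPass_eq (w h : Nat) (bv bh : List (List Bool)) (s : PySem.Set (Nat × Nat)) :
    pvPass w h bv bh s = (pvL w h).foldl (pvStep w h bv bh) (s, false) := by
  rw [pvPass, pvL, pvFoldl_flatMap]
  simp only [List.foldl_map]
  rfl

theorem pvFold_mono (w h : Nat) (bv bh : List (List Bool)) (l : List (Nat × Nat)) :
    ∀ (st : PySem.Set (Nat × Nat) × Bool) (a : Nat × Nat), a ∈ st.1 →
      a ∈ (l.foldl (pvStep w h bv bh) st).1 := by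
  induction l with
  | nil => exact fun st a ha => ha
  | cons c cs ih =>
    intro st a ha
    simp only [List.foldl_cons]
    refine ih _ a ?_
    unfold pvStep
    split_ifs with hc
    · simp [PySem.Set.mem_add, ha]
    · exact ha

theorem pvFold_flag (w h : Nat) (bv bh : List (List Bool)) (l : List (Nat × Nat)) :
    ∀ (st : PySem.Set (Nat × Nat) × Bool), st.2 = true →
      (l.foldl (pvStep w h bv bh) st).2 = true := by
  induction l with
  | nil => exact fun st h => h
  | cons c cs ih =>
    intro st hst
    simp only [List.foldl_cons]
    refine ih _ ?_
    unfold pvStep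
    split_ifs with hc
    · rfl
    · exact hst

theorem pvFold_nochange (w h : Nat) (bv bh : List (List Bool)) (l : List (Nat × Nat)) :
    ∀ (st : PySem.Set (Nat × Nat) × Bool), (l.foldl (pvStep w h bv bh) st).2 = false →
      (l.foldl (pvStep w h bv bh) st).1 = st.1 ∧ st.2 = false ∧
      ∀ c ∈ l, PySem.Set.contains st.1 c = true ∨ pvCond w h bv bh st.1 c.1 c.2 = false := by
  induction l with
  | nil => exact fun st h => ⟨rfl, h, by simp⟩
  | cons c cs ih =>
    intro st hf
    simp only [List.foldl_cons] at hf ⊢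
    by_cases hc : (!PySem.Set.contains st.1 c && pvCond w h bv bh st.1 c.1 c.2) = true
    · exfalso
      have : (pvStep w h bv bh st c).2 = true := by unfold pvStep; rw [if_pos hc]
      have := pvFold_flag w h bv bh cs _ this
      rw [this] at hf; cases hf
    · have hid : pvStep w h bv bh st c = st := by unfold pvStep; rw [if_neg hc]
      rw [hid] at hf ⊢
      obtain ⟨h1, h2, h3⟩ := ih st hf
      refine ⟨h1, h2, ?_⟩
      intro c' hc'
      rcases List.mem_cons.mp hc' with rfl | hcs
      · simp only [Bool.and_eq_true, Bool.not_eq_true'] at hc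
        by_cases hcon : PySem.Set.contains st.1 c' = true
        · exact Or.inl hcon
        · right
          by_cases hcd : pvCond w h bv bh st.1 c'.1 c'.2 = true
          · exact absurd ⟨by simpa using hcon, hcd⟩ hc
          · simpa using hcd
      · exact h3 c' hcs

theorem pvFold_new (w h : Nat) (bv bh : List (List Bool)) (l : List (Nat × Nat)) :
    ∀ (st : PySem.Set (Nat × Nat) × Bool) (a : Nat × Nat),
      a ∈ (l.foldl (pvStep w h bv bh) st).1 → a ∈ st.1 ∨ a ∈ l := by
  induction l with
  | nil => exact fun st a ha => Or.inl ha
  | cons c cs ih =>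
    intro st a ha
    simp only [List.foldl_cons] at ha
    rcases ih _ a ha with hin | hl
    · unfold pvStep at hin
      split_ifs at hin with hc
      · rw [PySem.Set.mem_add] at hin
        rcases hin with hs | rfl
        · exact Or.inl hs
        · exact Or.inr List.mem_cons_self
      · exact Or.inl hin
    · exact Or.inr (List.mem_cons_of_mem _ hl)

theorem pvCond_ex (w h : Nat) (bv bh : List (List Bool)) (s : PySem.Set (Nat × Nat))
    (cx cy : Nat) (hx : cx < w) (hy : cy < h)
    (hc : pvCond w h bv bh s cx cy = true) :
    ∃ d : Nat × Nat, pvMv w h bv bh (cx, cy) d ∧ d ∈ s := by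
  unfold pvCond at hc
  simp only [Bool.or_eq_true, Bool.and_eq_true, Bool.not_eq_true', decide_eq_true_eq,
    PySem.Set.contains_iff] at hc
  rcases hc with ((⟨⟨h1, h2⟩, h3⟩ | ⟨⟨h1, h2⟩, h3⟩) | ⟨⟨h1, h2⟩, h3⟩) | ⟨⟨h1, h2⟩, h3⟩
  · exact ⟨(cx - 1, cy), ⟨hx, hy, Or.inl ⟨h1, h2, rfl⟩⟩, h3⟩
  · exact ⟨(cx + 1, cy), ⟨hx, hy, Or.inr (Or.inl ⟨h1, h2, rfl⟩)⟩, h3⟩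
  · exact ⟨(cx, cy - 1), ⟨hx, hy, Or.inr (Or.inr (Or.inl ⟨h1, h2, rfl⟩))⟩, h3⟩
  · exact ⟨(cx, cy + 1), ⟨hx, hy, Or.inr (Or.inr (Or.inr ⟨h1, h2, rfl⟩))⟩, h3⟩

theorem pvCond_of (w h : Nat) (bv bh : List (List Bool)) (s : PySem.Set (Nat × Nat))
    (cx cy : Nat) (d : Nat × Nat)
    (hmv : pvMv w h bv bh (cx, cy) d) (hd : d ∈ s) : pvCond w h bv bh s cx cy = true := by
  obtain ⟨-, -, hcase⟩ := hmv
  unfold pvCond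
  simp only [Bool.or_eq_true, Bool.and_eq_true, Bool.not_eq_true', decide_eq_true_eq,
    PySem.Set.contains_iff]
  rcases hcase with ⟨h1, h2, rfl⟩ | ⟨h1, h2, rfl⟩ | ⟨h1, h2, rfl⟩ | ⟨h1, h2, rfl⟩
  · exact Or.inl (Or.inl (Or.inl ⟨⟨h1, h2⟩, hd⟩))
  · exact Or.inl (Or.inl (Or.inr ⟨⟨h1, h2⟩, hd⟩))
  · exact Or.inl (Or.inr ⟨⟨h1, h2⟩, hd⟩)
  · exact Or.inr ⟨⟨h1, h2⟩, hd⟩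

theorem pvFold_T (w h : Nat) (bv bh : List (List Bool)) (T : Nat × Nat → Prop)
    (hcl : ∀ c d : Nat × Nat, pvMv w h bv bh c d → T d → T c) (l : List (Nat × Nat)) :
    ∀ (st : PySem.Set (Nat × Nat) × Bool), (∀ c ∈ l, c.1 < w ∧ c.2 < h) →
      (∀ a ∈ st.1, T a) →
      ∀ a ∈ (l.foldl (pvStep w h bv bh) st).1, T a := by
  induction l with
  | nil => exact fun st _ hT a ha => hT a ha
  | cons c cs ih =>
    intro st hL hT
    simp only [List.foldl_cons]
    refine ih _ (fun c' hc' => hL c' (List.mem_cons_of_mem _ hc')) ?_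
    intro a ha
    unfold pvStep at ha
    split_ifs at ha with hc
    · rw [PySem.Set.mem_add] at ha
      rcases ha with hs | rfl
      · exact hT a hs
      · simp only [Bool.and_eq_true] at hc
        obtain ⟨haw, hah⟩ := hL a List.mem_cons_self
        rcases (pvCond_ex w h bv bh st.1 a.1 a.2 haw hah hc.2) with ⟨d, hmv, hd⟩
        exact hcl a d hmv (hT d hd)
    · exact hT a ha

theorem pvFold_added (w h : Nat) (bv bh : List (List Bool)) (l : List (Nat × Nat)) :
    ∀ (st : PySem.Set (Nat × Nat) × Bool), (l.foldl (pvStep w h bv bh) st).2 = true →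
      st.2 = false → ∃ a : Nat × Nat, a ∉ st.1 ∧ a ∈ (l.foldl (pvStep w h bv bh) st).1 ∧ a ∈ l := by
  induction l with
  | nil => intro st h1 h2; rw [List.foldl_nil] at h1; exact absurd h1 (by rw [h2]; simp)
  | cons c cs ih =>
    intro st h1 h2
    simp only [List.foldl_cons] at h1 ⊢
    by_cases hc : (!PySem.Set.contains st.1 c && pvCond w h bv bh st.1 c.1 c.2) = true
    · refine ⟨c, ?_, ?_, List.mem_cons_self⟩
      · simp only [Bool.and_eq_true, Bool.not_eq_true'] at hc
        intro hmem
        rw [(PySem.Set.contains_iff _ _).mpr hmem] at hc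
        cases hc.1
      · have hstep : pvStep w h bv bh st c = (PySem.Set.add st.1 c, true) := by
          unfold pvStep; rw [if_pos hc]
        rw [hstep]
        exact pvFold_mono w h bv bh cs _ c (by simp [PySem.Set.mem_add])
    · have hid : pvStep w h bv bh st c = st := by unfold pvStep; rw [if_neg hc]
      rw [hid] at h1 ⊢
      obtain ⟨a, ha1, ha2, ha3⟩ := ih st h1 h2
      exact ⟨a, ha1, ha2, List.mem_cons_of_mem _ ha3⟩

def pvSF (w h : Nat) (s : List (Nat × Nat)) : Finset (Nat × Nat) :=
  (Finset.range w ×ˢ Finset.range h).filter (fun c => c ∈ s)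

theorem pvSF_card_le (w h : Nat) (s : List (Nat × Nat)) : (pvSF w h s).card ≤ w * h := by
  calc (pvSF w h s).card ≤ (Finset.range w ×ˢ Finset.range h).card := Finset.card_filter_le _ _
    _ = w * h := by simp [Finset.card_product]

theorem pvMem_SF {w h : Nat} {s : List (Nat × Nat)} {c : Nat × Nat} :
    c ∈ pvSF w h s ↔ c.1 < w ∧ c.2 < h ∧ c ∈ s := by
  simp [pvSF, Finset.mem_filter, Finset.mem_product, and_assoc]

theorem pvRelax_master (w h : Nat) (bv bh : List (List Bool)) :
    ∀ (fuel : Nat) (s : PySem.Set (Nat × Nat)),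
    (∀ a ∈ s, a.1 < w ∧ a.2 < h) →
    w * h < fuel + (pvSF w h s).card →
    (∀ a ∈ s, a ∈ pvRelax w h bv bh fuel s) ∧
    (∀ c : Nat × Nat, c.1 < w → c.2 < h →
        (∃ d : Nat × Nat, pvMv w h bv bh c d ∧ d ∈ pvRelax w h bv bh fuel s) →
        c ∈ pvRelax w h bv bh fuel s) ∧
    (∀ T : Nat × Nat → Prop, (∀ c d : Nat × Nat, pvMv w h bv bh c d → T d → T c) →
        (∀ a ∈ s, T a) → ∀ a ∈ pvRelax w h bv bh fuel s, T a) := by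
  intro fuel
  induction fuel with
  | zero =>
    intro s _ hfuel
    have := pvSF_card_le w h s
    omega
  | succ fuel IH =>
    intro s hs hfuel
    have hLin : ∀ c ∈ pvL w h, c.1 < w ∧ c.2 < h := fun c hc => pvMem_L.mp hc
    have hred : pvRelax w h bv bh (fuel + 1) s =
        if (pvPass w h bv bh s).2 then pvRelax w h bv bh fuel (pvPass w h bv bh s).1
        else (pvPass w h bv bh s).1 := rfl
    by_cases hch : (pvPass w h bv bh s).2 = true
    · rw [hred, if_pos hch]
      rw [pvPass_eq] at hch ⊢
      have hmono := pvFold_mono w h bv bh (pvL w h) (s, false)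
      have hnew := pvFold_new w h bv bh (pvL w h) (s, false)
      have hinb' : ∀ a ∈ ((pvL w h).foldl (pvStep w h bv bh) (s, false)).1,
          a.1 < w ∧ a.2 < h := by
        intro a ha
        rcases hnew a ha with h0 | hl
        · exact hs a h0
        · exact pvMem_L.mp hl
      have hfuel' : w * h < fuel + (pvSF w h ((pvL w h).foldl (pvStep w h bv bh) (s, false)).1).card := by
        obtain ⟨a, ha1, ha2, ha3⟩ := pvFold_added w h bv bh (pvL w h) (s, false) hch rfl
        have hss : pvSF w h s ⊂ pvSF w h ((pvL w h).foldl (pvStep w h bv bh) (s, false)).1 := by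
          constructor
          · intro x hx
            rw [pvMem_SF] at hx ⊢
            exact ⟨hx.1, hx.2.1, hmono x hx.2.2⟩
          · intro hsub
            have : a ∈ pvSF w h s := hsub (by
              rw [pvMem_SF]
              exact ⟨(pvMem_L.mp ha3).1, (pvMem_L.mp ha3).2, ha2⟩)
            rw [pvMem_SF] at this
            exact ha1 this.2.2
        have := Finset.card_lt_card hss
        omega
      obtain ⟨I1, I2, I3⟩ := IH _ hinb' hfuel'
      refine ⟨fun a ha => I1 a (hmono a ha), I2, ?_⟩
      intro T hcl hT a ha
      exact I3 T hcl (pvFold_T w h bv bh T hcl (pvL w h) (s, false) hLin hT) a ha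
    · rw [hred, if_neg hch]
      rw [pvPass_eq] at hch ⊢
      have hnc := pvFold_nochange w h bv bh (pvL w h) (s, false)
        (by simpa using hch)
      rw [hnc.1]
      refine ⟨fun a ha => ha, ?_, fun T _ hT a ha => hT a ha⟩
      intro c hcx hcy ⟨d, hmv, hd⟩
      rcases hnc.2.2 c (pvMem_L.mpr ⟨hcx, hcy⟩) with hcon | hcond
      · exact (PySem.Set.contains_iff _ _).mp hcon
      · rw [pvCond_of w h bv bh s c.1 c.2 d (by simpa using hmv) hd] at hcond
        cases hcond

theorem pvCore (w h : Nat) (bv bh : List (List Bool)) (hw : 1 ≤ w) (hh : 1 ≤ h)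
    (x y : Nat) (hx : x < w) (hy : y < h) :
    pvGet2 (pvBFS w h bv bh (2 * (w * h) + 1)
        (pvSet2 (List.replicate h (List.replicate w false)) 0 0) [(0, 0)]) y x
      = PySem.Set.contains (pvRelax w h bv bh (w * h + 1) (PySem.Set.ofList [(0, 0)])) (x, y) := by
  have hwhpos : 0 < w * h := Nat.mul_pos hw hh
  have hwf0 : pvWf w h (List.replicate h (List.replicate w false)) := by
    refine ⟨List.length_replicate, ?_⟩
    intro r hr
    rw [List.eq_of_mem_replicate hr]
    exact List.length_replicate
  have hwfg0 : pvWf w h (pvSet2 (List.replicate h (List.replicate w false)) 0 0) :=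
    pvWf_set2 hwf0 0 0
  have hrep : ∀ y' x' : Nat, pvGet2 (List.replicate h (List.replicate w false)) y' x' = false := by
    intro y' x'
    unfold pvGet2
    rcases Nat.lt_or_ge y' h with hyl | hyl
    · have h1 : (List.replicate h (List.replicate w false)).getD y' [] = List.replicate w false := by
        rw [List.getD_eq_getElem _ _ (by simpa using hyl)]
        exact List.getElem_replicate _
      rw [h1]
      rcases Nat.lt_or_ge x' w with hxl | hxl
      · rw [List.getD_eq_getElem _ _ (by simpa using hxl)]
        exact List.getElem_replicate _
      · exact List.getD_eq_default _ _ (by simpa using hxl)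
    · have h1 : (List.replicate h (List.replicate w false)).getD y' [] = [] :=
        List.getD_eq_default _ _ (by simpa using hyl)
      rw [h1]
      rfl
  have hg0 : ∀ a : Nat × Nat,
      pvGet2 (pvSet2 (List.replicate h (List.replicate w false)) 0 0) a.2 a.1 = true ↔ a = (0, 0) := by
    intro a
    rw [pvGet2_set2 hwf0 hh hw]
    split_ifs with hcond
    · simp only [true_iff]
      exact Prod.ext hcond.2 hcond.1
    · rw [hrep]
      constructor
      · intro hfalse
        exact absurd hfalse (by simp)
      · intro hcontra
        subst hcontra
        exact absurd (⟨rfl, rfl⟩ : ((0, 0) : Nat × Nat).2 = 0 ∧ ((0, 0) : Nat × Nat).1 = 0) hcond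
  have h00 : pvGet2 (pvSet2 (List.replicate h (List.replicate w false)) 0 0) 0 0 = true :=
    (hg0 (0, 0)).mpr rfl
  have hinbB : ∀ a : Nat × Nat,
      pvGet2 (pvSet2 (List.replicate h (List.replicate w false)) 0 0) a.2 a.1 = true →
      a.1 < w ∧ a.2 < h := by
    intro a ha
    rw [(hg0 a).mp ha]
    exact ⟨hw, hh⟩
  have hqB : ∀ a ∈ ([(0, 0)] : List (Nat × Nat)),
      pvGet2 (pvSet2 (List.replicate h (List.replicate w false)) 0 0) a.2 a.1 = true := by
    intro a ha
    rw [List.mem_singleton] at ha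
    rw [ha]
    exact h00
  have hJB : ∀ a d : Nat × Nat,
      pvGet2 (pvSet2 (List.replicate h (List.replicate w false)) 0 0) a.2 a.1 = true →
      pvMv w h bv bh a d →
      pvGet2 (pvSet2 (List.replicate h (List.replicate w false)) 0 0) d.2 d.1 = true ∨
        a ∈ ([(0, 0)] : List (Nat × Nat)) := by
    intro a d ha _
    right
    rw [List.mem_singleton]
    exact (hg0 a).mp ha
  have hMF0 : pvMF w h (pvSet2 (List.replicate h (List.replicate w false)) 0 0) = {(0, 0)} := by
    ext c
    rw [pvMem_MF, Finset.mem_singleton]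
    constructor
    · intro hc; exact (hg0 c).mp hc.2.2
    · intro hc; rw [hc]; exact ⟨hw, hh, h00⟩
  have hmeasB : pvMeas w h (pvSet2 (List.replicate h (List.replicate w false)) 0 0) [(0, 0)]
      < 2 * (w * h) + 1 := by
    unfold pvMeas
    rw [hMF0, Finset.card_singleton]
    simp only [List.length_singleton]
    omega
  obtain ⟨B1, B2, B3⟩ := pvBFS_master w h bv bh (2 * (w * h) + 1)
    (pvSet2 (List.replicate h (List.replicate w false)) 0 0) [(0, 0)]
    hwfg0 hinbB hqB hJB hmeasB
  have hmem0 : ∀ a : Nat × Nat, a ∈ PySem.Set.ofList [((0 : Nat), (0 : Nat))] ↔ a = (0, 0) := by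
    intro a
    rw [PySem.Set.mem_ofList, List.mem_singleton]
  have hinbR : ∀ a ∈ PySem.Set.ofList [((0 : Nat), (0 : Nat))], a.1 < w ∧ a.2 < h := by
    intro a ha
    rw [(hmem0 a).mp ha]
    exact ⟨hw, hh⟩
  have hfuelR : w * h < (w * h + 1) + (pvSF w h (PySem.Set.ofList [((0 : Nat), (0 : Nat))])).card := by
    omega
  obtain ⟨R1, R2, R3⟩ := pvRelax_master w h bv bh (w * h + 1)
    (PySem.Set.ofList [((0 : Nat), (0 : Nat))]) hinbR hfuelR
  rw [Bool.eq_iff_iff]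
  constructor
  · intro hb
    rw [PySem.Set.contains_iff]
    refine B3 (fun c => c ∈ pvRelax w h bv bh (w * h + 1) (PySem.Set.ofList [((0 : Nat), (0 : Nat))]))
      ?_ ?_ (x, y) hb
    · intro a d hmv ha
      exact R2 d (pvMv_inb₂ hmv).1 (pvMv_inb₂ hmv).2 ⟨a, pvMv_symm hmv, ha⟩
    · intro a ha
      rw [(hg0 a).mp ha]
      exact R1 (0, 0) ((hmem0 (0, 0)).mpr rfl)
  · intro hb
    rw [PySem.Set.contains_iff] at hb
    refine R3 (fun c => pvGet2 (pvBFS w h bv bh (2 * (w * h) + 1)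
        (pvSet2 (List.replicate h (List.replicate w false)) 0 0) [(0, 0)]) c.2 c.1 = true)
      ?_ ?_ (x, y) hb
    · intro c d hmv hd
      exact B2 d c hd (pvMv_symm hmv)
    · intro a ha
      rw [(hmem0 a).mp ha]
      exact B1 (0, 0) h00

theorem pvAxis_len (vals : List Int) (hne : vals ≠ []) : 2 ≤ (pvAxis vals).length := by
  obtain ⟨v0, vs, rfl⟩ : ∃ v0 vs, vals = v0 :: vs := by
    cases vals with
    | nil => exact absurd rfl hne
    | cons a l => exact ⟨a, l, rfl⟩
  unfold pvAxis
  rw [PySem.List.length_sorted]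
  have hnd : (PySem.Set.union
      (PySem.Set.union (PySem.Set.ofList (v0 :: vs)) (PySem.Set.ofList ((v0 :: vs).map (· - 1))))
      (PySem.Set.ofList ((v0 :: vs).map (· + 1)))).Nodup :=
    PySem.Set.nodup_union _ _ (PySem.Set.nodup_union _ _ (PySem.Set.nodup_ofList _))
  have hm1 : v0 ∈ PySem.Set.union
      (PySem.Set.union (PySem.Set.ofList (v0 :: vs)) (PySem.Set.ofList ((v0 :: vs).map (· - 1))))
      (PySem.Set.ofList ((v0 :: vs).map (· + 1))) := by
    rw [PySem.Set.mem_union]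
    left
    rw [PySem.Set.mem_union]
    left
    rw [PySem.Set.mem_ofList]
    exact List.mem_cons_self
  have hm2 : v0 - 1 ∈ PySem.Set.union
      (PySem.Set.union (PySem.Set.ofList (v0 :: vs)) (PySem.Set.ofList ((v0 :: vs).map (· - 1))))
      (PySem.Set.ofList ((v0 :: vs).map (· + 1))) := by
    rw [PySem.Set.mem_union]
    left
    rw [PySem.Set.mem_union]
    right
    rw [PySem.Set.mem_ofList]
    exact List.mem_map_of_mem List.mem_cons_self
  set S := PySem.Set.union
      (PySem.Set.union (PySem.Set.ofList (v0 :: vs)) (PySem.Set.ofList ((v0 :: vs).map (· - 1))))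
      (PySem.Set.ofList ((v0 :: vs).map (· + 1))) with hS
  have hsub : ({v0, v0 - 1} : Finset Int) ⊆ S.toFinset := by
    intro x hx
    rw [Finset.mem_insert, Finset.mem_singleton] at hx
    rw [List.mem_toFinset]
    rcases hx with rfl | rfl
    · exact hm1
    · exact hm2
  have hcard2 : ({v0, v0 - 1} : Finset Int).card = 2 := Finset.card_pair (by omega)
  have := Finset.card_le_card hsub
  rw [hcard2, List.toFinset_card_of_nodup hnd] at this
  exact this

theorem pv_ports_eq (points : List (Int × Int)) (hne : points ≠ []) :
    build_outside_prefix points = build_outside_prefix_alt points := by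
  have hxs : 2 ≤ (pvAxis (points.map (·.1))).length :=
    pvAxis_len _ (by simpa using hne)
  have hys : 2 ≤ (pvAxis (points.map (·.2))).length :=
    pvAxis_len _ (by simpa using hne)
  simp only [build_outside_prefix, build_outside_prefix_alt]
  have hgrid :
      (List.range ((pvAxis (points.map (·.2))).length - 1)).map (fun y =>
        (List.range ((pvAxis (points.map (·.1))).length - 1)).map (fun x =>
          if pvGet2 (pvBFS ((pvAxis (points.map (·.1))).length - 1)
              ((pvAxis (points.map (·.2))).length - 1)
              (pvMark points (pvLookup (pvAxis (points.map (·.1))))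
                (pvLookup (pvAxis (points.map (·.2))))
                ((pvAxis (points.map (·.1))).length - 1)
                ((pvAxis (points.map (·.2))).length - 1)).1
              (pvMark points (pvLookup (pvAxis (points.map (·.1))))
                (pvLookup (pvAxis (points.map (·.2))))
                ((pvAxis (points.map (·.1))).length - 1)
                ((pvAxis (points.map (·.2))).length - 1)).2
              (2 * (((pvAxis (points.map (·.1))).length - 1) *
                ((pvAxis (points.map (·.2))).length - 1)) + 1)
              (pvSet2 (List.replicate ((pvAxis (points.map (·.2))).length - 1)
                (List.replicate ((pvAxis (points.map (·.1))).length - 1) false)) 0 0)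
              [(0, 0)]) y x
          then (1 : Int) else 0)) =
      (List.range ((pvAxis (points.map (·.2))).length - 1)).map (fun cy =>
        (List.range ((pvAxis (points.map (·.1))).length - 1)).map (fun cx =>
          if PySem.Set.contains (pvRelax ((pvAxis (points.map (·.1))).length - 1)
              ((pvAxis (points.map (·.2))).length - 1)
              (pvMark points (pvLookup (pvAxis (points.map (·.1))))
                (pvLookup (pvAxis (points.map (·.2))))
                ((pvAxis (points.map (·.1))).length - 1)
                ((pvAxis (points.map (·.2))).length - 1)).1
              (pvMark points (pvLookup (pvAxis (points.map (·.1))))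
                (pvLookup (pvAxis (points.map (·.2))))
                ((pvAxis (points.map (·.1))).length - 1)
                ((pvAxis (points.map (·.2))).length - 1)).2
              (((pvAxis (points.map (·.1))).length - 1) *
                ((pvAxis (points.map (·.2))).length - 1) + 1)
              (PySem.Set.ofList [(0, 0)])) (cx, cy)
          then (1 : Int) else 0)) := by
    apply List.map_congr_left
    intro y hy
    apply List.map_congr_left
    intro x hx
    rw [List.mem_range] at hy hx
    rw [pvCore _ _ _ _ (by omega) (by omega) x y hx hy]
  rw [hgrid]

-- ===== VERDICT (by name: the statement is the Claim_ definition above) =====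
theorem build_outside_prefix_spec : Claim_equal_build_outside_prefix := by
  intro points _ hpre
  unfold Spec_build_outside_prefix
  exact pv_ports_eq points hpre
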